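-- pv_equiv track=rewrite | github.com/ggracelynn/dragons | homework/homework3/rotate_digits.py | rotate_digits
-- ===== SOURCE A (Python) =====
-- def rotate_digits(n):
--     if n < 10:
--         return n  # If the number has only one digit, rotation won't change it
--     last_digit = n % 10  # Get the last digit of the number
--     rest_of_digits = n // 10  # Get the remaining digits of the number
--
--     #we need to multiply the last digit of the number properly to get it to the front!
--     multiplier = 1
--     while n >= 10:
--         n //= 10
--         multiplier *= 10
--
--     # Rotate the digits to the right by one position
--     rotated_number = last_digit * multiplier + rest_of_digits
--
--
--     return rotated_number
-- ===== SOURCE B (Python) =====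
-- def rotate_digits(n):
--     if n < 10:
--         return n  # single digit (or negative): unchanged
--     # Extract the decimal digits, least significant first.
--     digits = []
--     while n:
--         n, d = divmod(n, 10)
--         digits.append(d)
--     # The old last digit becomes the new leading digit; rebuild by Horner.
--     result = digits[0]
--     for d in reversed(digits[1:]):
--         result = result * 10 + d
--     return result
-- ===== Notes on version B (the rewrite author's own statement) =====
-- stated objective: alternative
-- what changed: B extracts the digit list once and rebuilds the rotated number by Horner accumulation over the digits, instead of A's separate multiplier power loop and arithmetic reassembly.
import Mathlib
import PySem

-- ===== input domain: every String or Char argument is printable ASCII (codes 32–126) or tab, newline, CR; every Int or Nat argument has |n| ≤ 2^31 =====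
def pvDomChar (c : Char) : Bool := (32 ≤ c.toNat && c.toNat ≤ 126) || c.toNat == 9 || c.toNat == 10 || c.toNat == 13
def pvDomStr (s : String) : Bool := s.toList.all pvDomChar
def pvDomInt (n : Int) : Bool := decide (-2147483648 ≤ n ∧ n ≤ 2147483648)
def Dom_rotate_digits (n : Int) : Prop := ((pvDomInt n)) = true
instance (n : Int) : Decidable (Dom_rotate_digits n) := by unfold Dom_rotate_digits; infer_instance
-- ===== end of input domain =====

-- B replaces A's multiplier power loop + arithmetic reassembly with a digit-list
-- extraction followed by Horner accumulation (objective: alternative, same cost).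

-- ===== PORT A =====
-- A's 'while n >= 10: n //= 10; multiplier *= 10' loop, carried state (n, multiplier)
def aLoop (n mult : Int) : Int :=
  if _h : 10 ≤ n then aLoop (PySem.Int.floordiv n 10) (mult * 10) else mult
termination_by n.toNat
decreasing_by
  rw [PySem.Int.floordiv_eq_ediv_of_pos (by norm_num)]
  have h0 : 0 ≤ n % 10 := Int.emod_nonneg _ (by norm_num)
  omega

def rotate_digits (n : Int) : Int :=
  if n < 10 then n
  else
    let last_digit := PySem.Int.mod n 10
    let rest_of_digits := PySem.Int.floordiv n 10
    let multiplier := aLoop n 1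
    last_digit * multiplier + rest_of_digits

-- ===== PORT B =====
-- Source B's 'while n: n, d = divmod(n, 10); digits.append(d)' loop; 'while n' is
-- written '0 < n' (equal to Python's 'n != 0' on every reached call: n ≥ 10 on entry
-- and stays ≥ 0; Python does not terminate for negative n, which is never reached)
def bDigits (n : Int) : List Int :=
  if _h : 0 < n then PySem.Int.mod n 10 :: bDigits (PySem.Int.floordiv n 10) else []
termination_by n.toNat
decreasing_by
  rw [PySem.Int.floordiv_eq_ediv_of_pos (by norm_num)]
  have h0 : 0 ≤ n % 10 := Int.emod_nonneg _ (by norm_num)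
  omega

def rotate_digits_alt (n : Int) : Int :=
  if n < 10 then n
  else
    let digits := bDigits n
    let result := PySem.List.pyGetD digits 0 0   -- digits[0]; digits ≠ [] since n ≥ 10
    ((PySem.List.slice digits (some 1) none).reverse).foldl (fun acc d => acc * 10 + d) result

-- ===== PRECONDITION & SPEC =====
def Spec_rotate_digits (n : Int) (out : Int) : Prop := out = rotate_digits_alt n
instance (n : Int) (out : Int) : Decidable (Spec_rotate_digits n out) := by unfold Spec_rotate_digits; infer_instance

-- ===== CLAIM (what is proved, stated in full; the proofs are below) =====
def Claim_equal_rotate_digits : Prop := ∀ (n : Int), Dom_rotate_digits n → Spec_rotate_digits n (rotate_digits n)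

-- ===== LEMMAS AND PROOFS =====

lemma bDigits_pos {n : Int} (h : 0 < n) :
    bDigits n = PySem.Int.mod n 10 :: bDigits (PySem.Int.floordiv n 10) := by
  rw [bDigits]; simp [h]

lemma bDigits_nonpos {n : Int} (h : ¬ 0 < n) : bDigits n = [] := by
  rw [bDigits]; simp [h]

lemma floordiv_ten_nonpos {n : Int} (h : ¬ 10 ≤ n) : ¬ 0 < PySem.Int.floordiv n 10 := by
  rw [PySem.Int.floordiv_eq_ediv_of_pos (by norm_num)]
  have h3 : 10 * (n / 10) + n % 10 = n := Int.mul_ediv_add_emod n 10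
  have h0 : 0 ≤ n % 10 := Int.emod_nonneg _ (by norm_num)
  have h2 : n % 10 < 10 := Int.emod_lt_of_pos _ (by norm_num)
  omega

lemma floordiv_ten_pos {n : Int} (h : 10 ≤ n) : 0 < PySem.Int.floordiv n 10 := by
  rw [PySem.Int.floordiv_eq_ediv_of_pos (by norm_num)]
  have h2 : n % 10 < 10 := Int.emod_lt_of_pos _ (by norm_num)
  have h3 : 10 * (n / 10) + n % 10 = n := Int.mul_ediv_add_emod n 10
  omega

-- Horner over the reversed LSB-first digit list of m rebuilds m behind acc
lemma horner_bDigits (k : Nat) : ∀ (m : Int), 0 ≤ m → m.toNat < k → ∀ (acc : Int),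
    (bDigits m).reverse.foldl (fun a d => a * 10 + d) acc
      = acc * 10 ^ (bDigits m).length + m := by
  induction k with
  | zero => intro m _ hk; omega
  | succ k ih =>
    intro m hm hk acc
    by_cases hpos : 0 < m
    · have hd : PySem.Int.floordiv m 10 = m / 10 :=
        PySem.Int.floordiv_eq_ediv_of_pos (by norm_num)
      have hmm : PySem.Int.mod m 10 = m % 10 :=
        PySem.Int.mod_eq_emod_of_pos (by norm_num)
      have hsplit : 10 * (m / 10) + m % 10 = m := Int.mul_ediv_add_emod m 10
      have h0 : 0 ≤ m % 10 := Int.emod_nonneg _ (by norm_num)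
      rw [bDigits_pos hpos, hd, hmm]
      simp only [List.reverse_cons, List.foldl_append, List.foldl_cons, List.foldl_nil,
        List.length_cons]
      rw [ih (m / 10) (by omega) (by omega) acc, pow_succ]
      linear_combination hsplit
    · rw [bDigits_nonpos hpos]
      simp
      omega

-- A's multiplier loop computes 10^(number of digits - 1), scaled by its accumulator
lemma aLoop_eq (k : Nat) : ∀ (n : Int), 0 < n → n.toNat < k → ∀ (m : Int),
    aLoop n m = m * 10 ^ ((bDigits n).length - 1) := by
  induction k with
  | zero => intro n _ hk; omega
  | succ k ih =>
    intro n hn hk m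
    by_cases h10 : 10 ≤ n
    · have hd : PySem.Int.floordiv n 10 = n / 10 :=
        PySem.Int.floordiv_eq_ediv_of_pos (by norm_num)
      have hsplit : 10 * (n / 10) + n % 10 = n := Int.mul_ediv_add_emod n 10
      have h0 : 0 ≤ n % 10 := Int.emod_nonneg _ (by norm_num)
      have h2 : n % 10 < 10 := Int.emod_lt_of_pos _ (by norm_num)
      rw [aLoop]
      simp only [h10, dite_true, hd]
      rw [ih (n / 10) (by omega) (by omega) (m * 10)]
      rw [bDigits_pos hn, hd]
      have hlen : 1 ≤ (bDigits (n / 10)).length := by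
        rw [bDigits_pos (by omega : 0 < n / 10)]; simp
      obtain ⟨L, hL⟩ : ∃ L, (bDigits (n / 10)).length = L + 1 :=
        ⟨_, (Nat.succ_pred_eq_of_pos hlen).symm⟩
      simp only [List.length_cons, Nat.add_sub_cancel, hL, pow_succ]
      ring
    · rw [aLoop]
      simp only [h10, dite_false]
      rw [bDigits_pos hn, bDigits_nonpos (floordiv_ten_nonpos h10)]
      simp

-- ===== VERDICT (by name: the statement is the Claim_ definition above) =====
theorem rotate_digits_spec : Claim_equal_rotate_digits := by
  intro n _hdom
  unfold Spec_rotate_digits rotate_digits rotate_digits_alt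
  by_cases hlt : n < 10
  · simp [hlt]
  · simp only [hlt, if_false]
    have h10 : 10 ≤ n := by omega
    have hn : 0 < n := by omega
    have hd : PySem.Int.floordiv n 10 = n / 10 :=
      PySem.Int.floordiv_eq_ediv_of_pos (by norm_num)
    have hq : 0 < n / 10 := by have := floordiv_ten_pos h10; omega
    rw [bDigits_pos hn, hd]
    simp only [PySem.List.pyGetD_zero_cons, PySem.List.slice_from_one, List.tail_cons]
    rw [horner_bDigits ((n / 10).toNat + 1) (n / 10) (by omega) (by omega)]
    rw [aLoop_eq (n.toNat + 1) n hn (by omega) 1, bDigits_pos hn, hd]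
    simp only [List.length_cons, Nat.add_sub_cancel, one_mul]
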